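-- pv_equiv track=rewrite | github.com/listnt/projectEuler | 259.py | all_joins
-- ===== SOURCE A (Python) =====
-- def all_joins(arr):
--     if not arr:
--         return [[]]
--
--     result = []
--     for i in range(1, len(arr)+1):
--         joined = ''.join(map(str, arr[:i]))
--         for rest in all_joins(arr[i:]):
--             result.append([joined] + rest)
--     return result
-- ===== SOURCE B (Python) =====
-- def all_joins(arr):
--     # right-to-left DP: partitions of each suffix are built once, ordered by
--     # first-group length, so prepending x is "x alone" ++ "x merged into first group"
--     if not arr:
--         return [[]]
--     acc = [[str(arr[-1])]]
--     for x in reversed(arr[:-1]):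
--         s = str(x)
--         acc = [[s] + p for p in acc] + [[s + p[0]] + p[1:] for p in acc]
--     return acc
-- ===== Notes on version B (the rewrite author's own statement) =====
-- stated objective: alternative
-- what changed: Replaces the prefix-recursion with repeated suffix slicing and re-joining by a single right-to-left dynamic-programming pass that builds the partitions of each suffix once, extending them by either prepending str(x) as a new group or merging it into the first group.
import Mathlib
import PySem

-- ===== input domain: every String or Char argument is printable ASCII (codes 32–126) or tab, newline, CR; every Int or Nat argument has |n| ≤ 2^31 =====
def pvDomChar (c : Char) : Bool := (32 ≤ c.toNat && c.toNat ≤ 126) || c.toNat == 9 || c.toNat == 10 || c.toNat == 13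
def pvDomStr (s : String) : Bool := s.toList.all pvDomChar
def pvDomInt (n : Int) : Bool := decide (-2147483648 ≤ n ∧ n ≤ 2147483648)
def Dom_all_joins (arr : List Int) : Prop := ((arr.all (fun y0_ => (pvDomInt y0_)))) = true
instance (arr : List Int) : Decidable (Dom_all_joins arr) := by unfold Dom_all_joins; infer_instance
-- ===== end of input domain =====

-- B changes the recursion on prefixes into one right-to-left DP pass sharing suffix results (alternative decomposition); return values proved equal.

-- ===== PORT A =====
-- 'for i in range(1, len(arr)+1)' is walked as k ∈ range(len arr) with i = k+1 (Nat form of the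
-- same loop; i ≥ 1 so arr[:i] = take i, arr[i:] = drop i exactly). The inner 'for rest in …:
-- result.append([joined] + rest)' is the inner foldl.
def all_joins (arr : List Int) : List (List String) :=
  if arr = [] then [[]]
  else
    (List.range arr.length).attach.foldl
      (fun result k =>
        let i := k.1 + 1
        let joined := PySem.Str.join "" ((arr.take i).map PySem.Int.toStr)
        (all_joins (arr.drop i)).foldl (fun res rest => res ++ [joined :: rest]) result)
      []
termination_by arr.length
decreasing_by
  have hk := k.2
  simp only [List.mem_range] at hk
  simp only [List.length_drop]
  omega

-- ===== PORT B =====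
-- one loop step of Source B: acc = [[s]+p for p in acc] + [[s+p[0]]+p[1:] for p in acc]
-- (every p in acc is nonempty; the [] branch is unreachable there)
def stepB (x : Int) (acc : List (List String)) : List (List String) :=
  (acc.map (fun p => PySem.Int.toStr x :: p)) ++
    (acc.map (fun p =>
      match p with
      | h :: t => (PySem.Int.toStr x ++ h) :: t
      | [] => [PySem.Int.toStr x]))

-- arr.reverse = arr[-1] :: reversed(arr[:-1]); the foldl is Source B's 'for x in reversed(arr[:-1])'
def all_joins_alt (arr : List Int) : List (List String) :=
  match arr.reverse with
  | [] => [[]]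
  | last :: initRev => initRev.foldl (fun acc x => stepB x acc) [[PySem.Int.toStr last]]

-- ===== PRECONDITION & SPEC =====
def Spec_all_joins (arr : List Int) (out : List (List String)) : Prop := out = all_joins_alt arr
instance (arr : List Int) (out : List (List String)) : Decidable (Spec_all_joins arr out) := by unfold Spec_all_joins; infer_instance

-- ===== CLAIM (what is proved, stated in full; the proofs are below) =====
def Claim_equal_all_joins : Prop := ∀ (arr : List Int), Dom_all_joins arr → Spec_all_joins arr (all_joins arr)

-- ===== LEMMAS AND PROOFS =====

-- ''.join distributes over cons
lemma join_empty_cons (a : String) (l : List String) :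
    PySem.Str.join "" (a :: l) = a ++ PySem.Str.join "" l := by
  cases l with
  | nil => simp [PySem.Str.join, PySem.Chars.join, List.intercalate]
  | cons b t => simp [PySem.Str.join, PySem.Chars.join, List.intercalate]

lemma join_empty_nil : PySem.Str.join "" ([] : List String) = "" := by
  simp [PySem.Str.join, PySem.Chars.join, List.intercalate]

-- the two nested loops of A, flattened
lemma all_joins_eq_flatMap (arr : List Int) (h : arr ≠ []) :
    all_joins arr = (List.range arr.length).flatMap
      (fun k => (all_joins (arr.drop (k+1))).map
        (fun rest => PySem.Str.join "" ((arr.take (k+1)).map PySem.Int.toStr) :: rest)) := by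
  rw [all_joins]
  simp only [h, if_false]
  rw [List.foldl_attach (l := List.range arr.length)
    (f := fun result i => (all_joins (arr.drop (i+1))).foldl
      (fun res rest => res ++ [PySem.Str.join "" ((arr.take (i+1)).map PySem.Int.toStr) :: rest]) result)]
  simp only [PySem.List.foldl_append_singleton_eq_map]
  rw [PySem.List.foldl_append_eq_flatMap]
  simp

lemma all_joins_nil : all_joins [] = [[]] := by rw [all_joins]; simp

lemma all_joins_single (x : Int) : all_joins [x] = [[PySem.Int.toStr x]] := by
  rw [all_joins_eq_flatMap [x] (by simp)]
  simp [all_joins_nil, join_empty_cons, join_empty_nil]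

-- A satisfies B's loop-step recurrence: all_joins (x :: s) = stepB x (all_joins s) for s ≠ []
lemma all_joins_cons (x : Int) (s : List Int) (hs : s ≠ []) :
    all_joins (x :: s) = stepB x (all_joins s) := by
  rw [all_joins_eq_flatMap (x :: s) (by simp)]
  simp only [List.length_cons, List.range_succ_eq_map, List.flatMap_cons, List.flatMap_map]
  unfold stepB
  congr 1
  · simp [join_empty_cons, join_empty_nil]
  · rw [all_joins_eq_flatMap s hs, List.map_flatMap]
    congr 1
    funext k
    simp [Function.comp, List.map_map, join_empty_cons]

-- B's loop step, peeled off the front of the input list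
lemma alt_cons (x : Int) (s : List Int) (hs : s ≠ []) :
    all_joins_alt (x :: s) = stepB x (all_joins_alt s) := by
  unfold all_joins_alt
  obtain ⟨l, r, hr⟩ : ∃ l r, s.reverse = l :: r := by
    cases h : s.reverse with
    | nil => exact absurd (by simpa using congrArg List.reverse h) hs
    | cons l r => exact ⟨l, r, rfl⟩
  simp [hr, List.foldl_append]

lemma alt_eq (arr : List Int) : all_joins arr = all_joins_alt arr := by
  induction arr with
  | nil => rw [all_joins_nil]; rfl
  | cons x s ih =>
    cases s with
    | nil => rw [all_joins_single]; rfl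
    | cons y t =>
      rw [all_joins_cons x (y :: t) (by simp), ih, alt_cons x (y :: t) (by simp)]

-- ===== VERDICT (by name: the statement is the Claim_ definition above) =====
theorem all_joins_spec : Claim_equal_all_joins := by
  intro arr _
  unfold Spec_all_joins
  exact alt_eq arr
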